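-- pv_equiv track=rewrite | github.com/mpohl100/mvg | network/schedule.py | find_subnetworks
-- ===== SOURCE A (Python) =====
-- from typing import Dict, List, Tuple
--
-- def is_connected(line1: Tuple[str, List[str]], line2: Tuple[str, List[str]]):
--     stations1 = set(line1[1])
--     stations2 = set(line2[1])
--     return len(stations1.intersection(stations2)) >= 2
--
-- def find_subnetworks(lines: List[Tuple[str, List[str]]]):
--     if len(lines) == 0:
--         return [] # base case of recursion
--     belongs_to_graph = [lines[0]]
--     to_be_examined = []
--     for line in lines[1:]:
--         if is_connected(belongs_to_graph[0], line):
--             belongs_to_graph.append(line)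
--         else:
--             to_be_examined.append(line)
--     ret = [belongs_to_graph]
--     other_graphs = find_subnetworks(to_be_examined)
--     if len(other_graphs) > 0:
--         ret = ret + other_graphs
--     return ret
-- ===== SOURCE B (Python) =====
-- def find_subnetworks(lines):
--     result = []
--     remaining = lines
--     while remaining:
--         rep = remaining[0]
--         rep_stations = set(rep[1])
--         group = [rep]
--         leftover = []
--         for line in remaining[1:]:
--             if len(rep_stations & set(line[1])) >= 2:
--                 group.append(line)
--             else:
--                 leftover.append(line)
--         result.append(group)
--         remaining = leftover
--     return result
-- ===== Notes on version B (the rewrite author's own statement) =====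
-- stated objective: simpler
-- what changed: Replaces the recursion (which rebuilds the leftover list and concatenates the recursive result) with a single iterative while-loop keeping 'remaining' and an accumulating 'result', inlining the connection test with the representative's station set computed once per group.
import Mathlib
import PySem

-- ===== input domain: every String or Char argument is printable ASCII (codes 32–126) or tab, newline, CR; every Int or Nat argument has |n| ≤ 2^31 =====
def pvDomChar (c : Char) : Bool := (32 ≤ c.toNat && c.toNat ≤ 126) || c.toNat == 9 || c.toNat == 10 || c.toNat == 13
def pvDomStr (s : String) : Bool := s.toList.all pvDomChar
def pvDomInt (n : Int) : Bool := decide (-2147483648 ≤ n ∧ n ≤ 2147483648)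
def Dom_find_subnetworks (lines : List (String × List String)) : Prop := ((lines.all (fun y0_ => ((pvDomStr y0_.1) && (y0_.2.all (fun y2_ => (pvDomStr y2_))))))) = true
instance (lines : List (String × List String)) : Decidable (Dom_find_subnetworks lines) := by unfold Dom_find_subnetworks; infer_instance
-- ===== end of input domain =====

-- B replaces A's recursion by a single iterative loop over the remaining lines with an
-- accumulated result (objective: simpler decomposition, same cost).

-- ===== PORT A =====
-- is_connected(line1, line2): len(set(line1[1]) & set(line2[1])) >= 2
def is_connected (line1 line2 : String × List String) : Bool :=
  decide (2 ≤ PySem.Set.len (PySem.Set.inter (PySem.Set.ofList line1.2) (PySem.Set.ofList line2.2)))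

-- A's for-loop body: append to belongs_to_graph (p.1) or to_be_examined (p.2)
def fsStep (l0 : String × List String)
    (p : List (String × List String) × List (String × List String))
    (line : String × List String) :
    List (String × List String) × List (String × List String) :=
  if is_connected l0 line then (p.1 ++ [line], p.2) else (p.1, p.2 ++ [line])

-- termination fact for A's recursion on to_be_examined (cited in decreasing_by)
theorem fsStep_snd_len_le (l0 : String × List String) :
    ∀ (rest : List (String × List String)) (g t : List (String × List String)),
      ((rest.foldl (fsStep l0) (g, t)).2).length ≤ t.length + rest.length := by
  intro rest
  induction rest with
  | nil => intro g t; simp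
  | cons x xs ih =>
    intro g t
    simp only [List.foldl_cons, fsStep]
    split_ifs with h
    · exact le_trans (ih _ _) (by simp only [List.length_cons]; omega)
    · exact le_trans (ih _ _) (by simp only [List.length_append, List.length_cons, List.length_nil]; omega)

def find_subnetworks (lines : List (String × List String)) : List (List (String × List String)) :=
  match lines with
  | [] => []
  | l0 :: rest =>
    let p := rest.foldl (fsStep l0) ([l0], [])
    let ret := [p.1]
    let other_graphs := find_subnetworks p.2
    if other_graphs.length > 0 then ret ++ other_graphs else ret
termination_by lines.length
decreasing_by
  simp only [List.length_cons]
  exact Nat.lt_succ_of_le (by simpa using fsStep_snd_len_le l0 rest [l0] [])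

-- ===== PORT B =====
-- the inner for-loop of Source B: split remaining[1:] into (group tail, leftover)
def altSplit (repStations : PySem.Set String) :
    List (String × List String) → List (String × List String) × List (String × List String)
  | [] => ([], [])
  | line :: ls =>
    let p := altSplit repStations ls
    if decide (2 ≤ PySem.Set.len (PySem.Set.inter repStations (PySem.Set.ofList line.2)))
    then (line :: p.1, p.2) else (p.1, line :: p.2)

theorem altSplit_snd_len_le (s : PySem.Set String) :
    ∀ (ls : List (String × List String)), ((altSplit s ls).2).length ≤ ls.length := by
  intro ls
  induction ls with
  | nil => simp [altSplit]
  | cons x xs ih =>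
    simp only [altSplit, List.length_cons]
    split <;> simp <;> omega

-- the while-loop of Source B, on state (remaining, result)
def altGo : List (String × List String) → List (List (String × List String)) →
    List (List (String × List String))
  | [], result => result
  | rep :: rest, result =>
    let p := altSplit (PySem.Set.ofList rep.2) rest
    altGo p.2 (result ++ [rep :: p.1])
termination_by remaining _ => remaining.length
decreasing_by
  simp only [List.length_cons]
  exact Nat.lt_succ_of_le (altSplit_snd_len_le _ rest)

def find_subnetworks_alt (lines : List (String × List String)) : List (List (String × List String)) :=
  altGo lines []

-- ===== PRECONDITION & SPEC =====
def Spec_find_subnetworks (lines : List (String × List String)) (out : List (List (String × List String))) : Prop := out = find_subnetworks_alt lines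
instance (lines : List (String × List String)) (out : List (List (String × List String))) : Decidable (Spec_find_subnetworks lines out) := by unfold Spec_find_subnetworks; infer_instance

-- ===== CLAIM (what is proved, stated in full; the proofs are below) =====
def Claim_equal_find_subnetworks : Prop := ∀ (lines : List (String × List String)), Dom_find_subnetworks lines → Spec_find_subnetworks lines (find_subnetworks lines)

-- ===== LEMMAS AND PROOFS =====

-- A's foldl-partition equals B's structural split, modulo the initial accumulators
theorem foldl_eq_altSplit (l0 : String × List String) :
    ∀ (rest g t : List (String × List String)),
      rest.foldl (fsStep l0) (g, t) =
        (g ++ (altSplit (PySem.Set.ofList l0.2) rest).1,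
         t ++ (altSplit (PySem.Set.ofList l0.2) rest).2) := by
  intro rest
  induction rest with
  | nil => intro g t; simp [altSplit]
  | cons x xs ih =>
    intro g t
    simp only [List.foldl_cons, fsStep, altSplit, is_connected]
    split_ifs with h
    · simp [ih]
    · simp [ih]

-- A's 'if other nonempty then concat else singleton' is always cons
theorem find_subnetworks_cons (l0 : String × List String) (rest : List (String × List String)) :
    find_subnetworks (l0 :: rest) =
      (l0 :: (altSplit (PySem.Set.ofList l0.2) rest).1) ::
        find_subnetworks (altSplit (PySem.Set.ofList l0.2) rest).2 := by
  rw [find_subnetworks]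
  simp only [foldl_eq_altSplit l0 rest [l0] [], List.nil_append, List.singleton_append]
  cases h : find_subnetworks (altSplit (PySem.Set.ofList l0.2) rest).2 with
  | nil => simp
  | cons y ys => simp

-- the loop invariant: altGo accumulates A's result
theorem altGo_eq (n : ℕ) :
    ∀ (remaining : List (String × List String)), remaining.length ≤ n →
      ∀ (result : List (List (String × List String))),
        altGo remaining result = result ++ find_subnetworks remaining := by
  induction n with
  | zero =>
    intro remaining h result
    have : remaining = [] := List.length_eq_zero_iff.mp (Nat.le_zero.mp h)
    subst this
    simp [altGo, find_subnetworks]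
  | succ n ih =>
    intro remaining h result
    cases remaining with
    | nil => simp [altGo, find_subnetworks]
    | cons rep rest =>
      rw [altGo, find_subnetworks_cons]
      have hlen : ((altSplit (PySem.Set.ofList rep.2) rest).2).length ≤ n := by
        have := altSplit_snd_len_le (PySem.Set.ofList rep.2) rest
        simp only [List.length_cons] at h
        omega
      rw [ih _ hlen]
      simp

-- ===== VERDICT (by name: the statement is the Claim_ definition above) =====
theorem find_subnetworks_spec : Claim_equal_find_subnetworks := by
  intro lines _
  unfold Spec_find_subnetworks find_subnetworks_alt
  rw [altGo_eq lines.length lines le_rfl []]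
  simp
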